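-- pv_equiv track=rewrite | github.com/dskoda1/435DataMining | final/helper.py | getOccurences
-- ===== SOURCE A (Python) =====
-- import copy
--
-- def getOccurences(clusteredVecs):
--   occurences = {0: 0, 1: 0, 2: 0, 3: 0, 4: 0, 5: 0}
--   counter = [(copy.deepcopy(occurences)) for i in range(6)]
--   res = [[] for i in range(6)]
--
--   for vec in (clusteredVecs):
--     res[vec['cluster']].append(vec['class'])
--   for i, r in enumerate(res):
--     for c in r:
--       counter[i][c] = counter[i][c] + 1
--   return counter
-- ===== SOURCE B (Python) =====
-- def getOccurences(clusteredVecs):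
--   counter = [{c: 0 for c in range(6)} for _ in range(6)]
--   for vec in clusteredVecs:
--     counter[vec['cluster']][vec['class']] += 1
--   return counter
-- ===== Notes on version B (the rewrite author's own statement) =====
-- stated objective: simpler
-- what changed: B replaces A's two-pass structure (bucket the class labels into six intermediate per-cluster lists, then rescan the buckets with enumerate to build the count dicts) with a single pass that increments counter[vec['cluster']][vec['class']] directly, dropping the intermediate res table and the deepcopy import entirely.
import Mathlib
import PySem

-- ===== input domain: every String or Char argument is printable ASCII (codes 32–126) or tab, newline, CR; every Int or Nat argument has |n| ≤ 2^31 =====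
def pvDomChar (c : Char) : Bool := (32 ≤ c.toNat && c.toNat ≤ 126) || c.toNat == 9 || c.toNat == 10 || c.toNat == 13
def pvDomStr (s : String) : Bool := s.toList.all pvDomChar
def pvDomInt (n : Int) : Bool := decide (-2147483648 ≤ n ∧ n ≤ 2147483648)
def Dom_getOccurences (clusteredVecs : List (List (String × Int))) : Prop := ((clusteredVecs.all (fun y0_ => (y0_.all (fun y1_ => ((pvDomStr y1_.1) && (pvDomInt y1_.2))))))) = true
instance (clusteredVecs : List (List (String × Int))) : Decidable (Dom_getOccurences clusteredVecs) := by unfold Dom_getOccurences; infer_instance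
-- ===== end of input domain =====

-- B counts in one pass over clusteredVecs, dropping A's intermediate per-cluster bucket lists and second scan (objective: simpler).


-- ===== PORT A =====
-- Python list indexing into a 6-element list (negative indices count from the end); none = IndexError.
def pvIdx6 (i : Int) : Option Nat :=
  if 0 ≤ i ∧ i < 6 then some i.toNat
  else if -6 ≤ i ∧ i < 0 then some (i + 6).toNat
  else none

-- occurences = {0: 0, 1: 0, 2: 0, 3: 0, 4: 0, 5: 0} (each deepcopy is this same literal dict)
def pvInit : PySem.Dict Int Int := PySem.Dict.mk [(0,0),(1,0),(2,0),(3,0),(4,0),(5,0)]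

-- d[c] = d[c] + 1 ; on a missing key Python raises KeyError (excluded by Pre_), here a no-op
def pvIncr (d : PySem.Dict Int Int) (c : Int) : PySem.Dict Int Int :=
  match d.get? c with
  | some v => d.insert c (v + 1)
  | none => d

-- body of A's first loop: res[vec['cluster']].append(vec['class'])
def pvStepA (res : List (List Int)) (vec : List (String × Int)) : List (List Int) :=
  match (PySem.Dict.mk vec).get? "cluster" with
  | none => res                                  -- KeyError (excluded by Pre_)
  | some cl =>
    match pvIdx6 cl with
    | none => res                                -- IndexError (excluded by Pre_)
    | some i =>
      match (PySem.Dict.mk vec).get? "class" with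
      | none => res                              -- KeyError (excluded by Pre_)
      | some k => res.set i (res.getD i [] ++ [k])

-- A's second loop: for i, r in enumerate(res): for c in r: counter[i][c] += 1
def pvPhase2 : List (List Int) → Nat → List (PySem.Dict Int Int) → List (PySem.Dict Int Int)
  | [], _, ctr => ctr
  | r :: rest, i, ctr =>
      pvPhase2 rest (i + 1)
        (r.foldl (fun c cls => c.set i (pvIncr (c.getD i PySem.Dict.empty) cls)) ctr)

def getOccurences (clusteredVecs : List (List (String × Int))) : List (List (Int × Int)) :=
  (pvPhase2 (clusteredVecs.foldl pvStepA (List.replicate 6 [])) 0 (List.replicate 6 pvInit)).map (·.items)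

-- ===== PORT B =====
-- {c: 0 for c in range(6)}
def pvInitB : PySem.Dict Int Int :=
  PySem.Dict.ofList ((PySem.List.pyRange 0 6 1).map (fun c => (c, (0 : Int))))

-- body of B's single loop: counter[vec['cluster']][vec['class']] += 1
def pvStepB (ctr : List (PySem.Dict Int Int)) (vec : List (String × Int)) : List (PySem.Dict Int Int) :=
  match (PySem.Dict.mk vec).get? "cluster" with
  | none => ctr                                  -- KeyError (excluded by Pre_)
  | some cl =>
    match pvIdx6 cl with
    | none => ctr                                -- IndexError (excluded by Pre_)
    | some i =>
      match (PySem.Dict.mk vec).get? "class" with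
      | none => ctr                              -- KeyError (excluded by Pre_)
      | some k => ctr.set i (pvIncr (ctr.getD i PySem.Dict.empty) k)

def getOccurences_alt (clusteredVecs : List (List (String × Int))) : List (List (Int × Int)) :=
  (clusteredVecs.foldl pvStepB (List.replicate 6 pvInitB)).map (·.items)

-- ===== PRECONDITION & SPEC =====
-- Pre_ excludes exactly the inputs on which Python A raises: a vec missing the 'cluster' or
-- 'class' key (KeyError), a cluster outside -6..5 (IndexError on res), or a class outside 0..5
-- (KeyError on the counter dict).
def pvOkVec (vec : List (String × Int)) : Bool :=
  (match (PySem.Dict.mk vec).get? "cluster" with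
   | some c => decide (-6 ≤ c ∧ c < 6)
   | none => false) &&
  (match (PySem.Dict.mk vec).get? "class" with
   | some k => decide (0 ≤ k ∧ k < 6)
   | none => false)

def Pre_getOccurences (clusteredVecs : List (List (String × Int))) : Prop :=
  ∀ vec ∈ clusteredVecs, pvOkVec vec = true

instance (clusteredVecs : List (List (String × Int))) : Decidable (Pre_getOccurences clusteredVecs) := by
  unfold Pre_getOccurences; infer_instance

def pvWitness_getOccurences : (List (List (String × Int))) :=
  [[("cluster", 1), ("class", 2)], [("cluster", -1), ("class", 2)]]

def Spec_getOccurences (clusteredVecs : List (List (String × Int))) (out : List (List (Int × Int))) : Prop := out = getOccurences_alt clusteredVecs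
instance (clusteredVecs : List (List (String × Int))) (out : List (List (Int × Int))) : Decidable (Spec_getOccurences clusteredVecs out) := by unfold Spec_getOccurences; infer_instance

-- ===== CLAIM (what is proved, stated in full; the proofs are below) =====
def Claim_equal_getOccurences : Prop := ∀ (clusteredVecs : List (List (String × Int))), Dom_getOccurences clusteredVecs → Pre_getOccurences clusteredVecs → Spec_getOccurences clusteredVecs (getOccurences clusteredVecs)

-- ===== LEMMAS AND PROOFS =====

-- the abstraction: what A's second phase makes of a bucket table
def pvG (res : List (List Int)) : List (PySem.Dict Int Int) :=
  res.map (fun r => r.foldl pvIncr pvInit)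

lemma pvIdx6_lt {i : Int} {n : Nat} (h : pvIdx6 i = some n) : n < 6 := by
  unfold pvIdx6 at h
  split_ifs at h with h1 h2 <;> (simp only [Option.some.injEq] at h; omega)

lemma pvLenStepA (res : List (List Int)) (vec : List (String × Int)) :
    (pvStepA res vec).length = res.length := by
  unfold pvStepA
  repeat' split
  all_goals simp

lemma pvLenFoldA (cvs : List (List (String × Int))) (res : List (List Int)) :
    (cvs.foldl pvStepA res).length = res.length := by
  induction cvs generalizing res with
  | nil => rfl
  | cons v t ih => simp [List.foldl_cons, ih, pvLenStepA]

-- the inner 'for c in r' loop only rewrites slot i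
lemma pvInnerFold (r : List Int) (ctr : List (PySem.Dict Int Int)) (i : Nat) (hi : i < ctr.length) :
    r.foldl (fun c cls => c.set i (pvIncr (c.getD i PySem.Dict.empty) cls)) ctr
      = ctr.set i (r.foldl pvIncr (ctr.getD i PySem.Dict.empty)) := by
  induction r generalizing ctr with
  | nil =>
      simp [List.getD_eq_getElem?_getD, List.getElem?_eq_getElem hi, List.set_getElem_self]
  | cons a t ih =>
      rw [List.foldl_cons, ih _ (by simpa using hi), List.set_set, List.foldl_cons]
      congr 2
      simp [List.getD_eq_getElem?_getD, hi]

-- A's second phase, processing slots n.. of ctr, is a pointwise zipWith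
lemma pvPhase2_eq (res : List (List Int)) (n : Nat) (ctr : List (PySem.Dict Int Int))
    (h : n + res.length = ctr.length) :
    pvPhase2 res n ctr
      = ctr.take n ++ List.zipWith (fun r d => r.foldl pvIncr d) res (ctr.drop n) := by
  induction res generalizing n ctr with
  | nil => simp at h; simp [pvPhase2, List.take_of_length_le (le_of_eq h.symm)]
  | cons r rest ih =>
      have hn : n < ctr.length := by simp at h; omega
      rw [pvPhase2, pvInnerFold r ctr n hn]
      rw [ih (n + 1) _ (by simp at h ⊢; omega)]
      rw [List.set_eq_take_append_cons_drop, if_pos hn]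
      rw [List.drop_eq_getElem_cons hn]
      have htl : (ctr.take n).length = n := List.length_take_of_le (le_of_lt hn)
      rw [List.zipWith_cons_cons]
      rw [show n + 1 = (ctr.take n).length + 1 by rw [htl]]
      rw [List.take_length_add_append, List.drop_length_add_append]
      simp [htl, List.getD_eq_getElem?_getD, List.getElem?_eq_getElem hn]

lemma pvZipWithReplicate (res : List (List Int)) (n : Nat) (h : res.length = n) :
    List.zipWith (fun r d => r.foldl pvIncr d) res (List.replicate n pvInit) = pvG res := by
  induction res generalizing n with
  | nil => simp [pvG]
  | cons r t ih =>
      cases n with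
      | zero => simp at h
      | succ m =>
          rw [List.replicate_succ, List.zipWith_cons_cons, ih m (by simpa using h)]
          rfl

-- one vec: bucketing-then-counting commutes with direct counting
lemma pvStepComm (res : List (List Int)) (vec : List (String × Int)) (h : res.length = 6) :
    pvG (pvStepA res vec) = pvStepB (pvG res) vec := by
  unfold pvStepA pvStepB
  cases hc : (PySem.Dict.mk vec).get? "cluster" with
  | none => simp
  | some cl =>
    cases hi : pvIdx6 cl with
    | none => simp [hi]
    | some i =>
      cases hk : (PySem.Dict.mk vec).get? "class" with
      | none => simp [hi]
      | some k =>
        have hlt : i < res.length := by rw [h]; exact pvIdx6_lt hi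
        simp only [hi, pvG, List.map_set]
        congr 1
        rw [List.foldl_append, List.foldl_cons, List.foldl_nil,
            List.getD_eq_getElem?_getD, List.getD_eq_getElem?_getD,
            List.getElem?_eq_getElem hlt, List.getElem?_eq_getElem (by simpa using hlt),
            List.getElem_map]
        rfl

lemma pvFoldComm (cvs : List (List (String × Int))) (res : List (List Int)) (h : res.length = 6) :
    pvG (cvs.foldl pvStepA res) = cvs.foldl pvStepB (pvG res) := by
  induction cvs generalizing res with
  | nil => rfl
  | cons v t ih =>
      rw [List.foldl_cons, List.foldl_cons, ih _ (by rw [pvLenStepA, h]), pvStepComm _ _ h]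

lemma pvInitB_eq : pvInitB = pvInit := by decide

-- ===== VERDICT (by name: the statement is the Claim_ definition above) =====
theorem getOccurences_spec : Claim_equal_getOccurences := by
  intro cvs _ _
  unfold Spec_getOccurences getOccurences getOccurences_alt
  have hlen : (cvs.foldl pvStepA (List.replicate 6 [])).length = 6 := by
    rw [pvLenFoldA]; rfl
  rw [pvPhase2_eq _ 0 _ (by simpa using hlen)]
  rw [List.take_zero, List.drop_zero, List.nil_append]
  rw [pvZipWithReplicate _ 6 hlen]
  rw [pvFoldComm _ _ (by rfl)]
  rw [pvInitB_eq]
  have : pvG (List.replicate 6 []) = List.replicate 6 pvInit := by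
    simp [pvG]
  rw [this]
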